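-- pv_equiv track=rewrite | github.com/kouekamluc/ascai-v2 | apps/universities/management/commands/populate_universities.py | _map_university_to_city
-- ===== SOURCE A (Python) =====
-- def _map_university_to_city(name):
--     """Map university name to Lazio city."""
--     name_lower = name.lower()
--
--     # Rome universities
--     if any(keyword in name_lower for keyword in ['sapienza', 'roma tre', 'tor vergata', 'luiss', 'cattolica']):
--         return ('rome', 'Rome, Lazio, Italy')
--
--     # Other Lazio cities
--     if 'cassino' in name_lower:
--         return ('cassino', 'Cassino, Lazio, Italy')
--     if 'viterbo' in name_lower or 'tuscia' in name_lower:
--         return ('viterbo', 'Viterbo, Lazio, Italy')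
--     if 'latina' in name_lower:
--         return ('latina', 'Latina, Lazio, Italy')
--     if 'frosinone' in name_lower:
--         return ('frosinone', 'Frosinone, Lazio, Italy')
--     if 'rieti' in name_lower:
--         return ('rieti', 'Rieti, Lazio, Italy')
--
--     return None
-- ===== SOURCE B (Python) =====
-- # Flat keyword -> priority map; city tuples indexed by priority.
-- _KEYWORD_PRIORITY = {
--     'sapienza': 0, 'roma tre': 0, 'tor vergata': 0, 'luiss': 0, 'cattolica': 0,
--     'cassino': 1,
--     'viterbo': 2, 'tuscia': 2,
--     'latina': 3,
--     'frosinone': 4,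
--     'rieti': 5,
-- }
--
-- _CITIES = [
--     ('rome', 'Rome, Lazio, Italy'),
--     ('cassino', 'Cassino, Lazio, Italy'),
--     ('viterbo', 'Viterbo, Lazio, Italy'),
--     ('latina', 'Latina, Lazio, Italy'),
--     ('frosinone', 'Frosinone, Lazio, Italy'),
--     ('rieti', 'Rieti, Lazio, Italy'),
-- ]
--
--
-- def _map_university_to_city(name):
--     """Map university name to Lazio city."""
--     name_lower = name.lower()
--     hits = [p for kw, p in _KEYWORD_PRIORITY.items() if kw in name_lower]
--     if not hits:
--         return None
--     return _CITIES[min(hits)]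
-- ===== Notes on version B (the rewrite author's own statement) =====
-- stated objective: alternative
-- what changed: Instead of an ordered short-circuiting if-chain over rule groups, B tests every keyword against a flat keyword->priority map, collects all matching priorities, and returns the city with the minimum matched priority (no early return, aggregation by min).
import Mathlib
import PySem

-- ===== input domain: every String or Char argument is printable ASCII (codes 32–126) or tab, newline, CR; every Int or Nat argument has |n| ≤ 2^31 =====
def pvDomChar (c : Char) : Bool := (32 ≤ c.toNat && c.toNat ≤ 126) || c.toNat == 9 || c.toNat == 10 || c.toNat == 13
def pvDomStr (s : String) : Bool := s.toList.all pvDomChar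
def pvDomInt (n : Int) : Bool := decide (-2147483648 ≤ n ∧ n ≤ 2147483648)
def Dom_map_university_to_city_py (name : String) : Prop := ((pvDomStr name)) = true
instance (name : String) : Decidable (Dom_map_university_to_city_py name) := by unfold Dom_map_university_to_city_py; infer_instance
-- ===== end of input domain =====

-- B replaces A's ordered short-circuit if-chain by collecting every matching keyword's priority from a flat map and taking the minimum (alternative decomposition).


-- ===== PORT A =====
def map_university_to_city_py (name : String) : Option (String × String) :=
  let name_lower := PySem.Str.lower name
  if ["sapienza", "roma tre", "tor vergata", "luiss", "cattolica"].any
       (fun keyword => PySem.Str.isIn keyword name_lower) then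
    some ("rome", "Rome, Lazio, Italy")
  else if PySem.Str.isIn "cassino" name_lower then
    some ("cassino", "Cassino, Lazio, Italy")
  else if PySem.Str.isIn "viterbo" name_lower || PySem.Str.isIn "tuscia" name_lower then
    some ("viterbo", "Viterbo, Lazio, Italy")
  else if PySem.Str.isIn "latina" name_lower then
    some ("latina", "Latina, Lazio, Italy")
  else if PySem.Str.isIn "frosinone" name_lower then
    some ("frosinone", "Frosinone, Lazio, Italy")
  else if PySem.Str.isIn "rieti" name_lower then
    some ("rieti", "Rieti, Lazio, Italy")
  else
    none

-- ===== PORT B =====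
-- flat keyword -> priority association list (insertion order of the Python dict)
def pvKeywordPriority : List (String × Int) :=
  [ ("sapienza", 0), ("roma tre", 0), ("tor vergata", 0), ("luiss", 0), ("cattolica", 0),
    ("cassino", 1),
    ("viterbo", 2), ("tuscia", 2),
    ("latina", 3),
    ("frosinone", 4),
    ("rieti", 5) ]

def pvCities : List (String × String) :=
  [ ("rome", "Rome, Lazio, Italy"),
    ("cassino", "Cassino, Lazio, Italy"),
    ("viterbo", "Viterbo, Lazio, Italy"),
    ("latina", "Latina, Lazio, Italy"),
    ("frosinone", "Frosinone, Lazio, Italy"),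
    ("rieti", "Rieti, Lazio, Italy") ]

def map_university_to_city_py_alt (name : String) : Option (String × String) :=
  let name_lower := PySem.Str.lower name
  let hits := (pvKeywordPriority.filter (fun kp => PySem.Str.isIn kp.1 name_lower)).map (·.2)
  match PySem.List.min? hits (fun x => x) with
  | none => none
  | some p => PySem.List.pyGet? pvCities p

-- ===== PRECONDITION & SPEC =====
def Spec_map_university_to_city_py (name : String) (out : Option (String × String)) : Prop := out = map_university_to_city_py_alt name
instance (name : String) (out : Option (String × String)) : Decidable (Spec_map_university_to_city_py name out) := by unfold Spec_map_university_to_city_py; infer_instance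

-- ===== CLAIM (what is proved, stated in full; the proofs are below) =====
def Claim_equal_map_university_to_city_py : Prop := ∀ (name : String), Dom_map_university_to_city_py name → Spec_map_university_to_city_py name (map_university_to_city_py name)

-- ===== LEMMAS AND PROOFS =====

-- ===== VERDICT (by name: the statement is the Claim_ definition above) =====
set_option maxHeartbeats 2000000 in
theorem map_university_to_city_py_spec : Claim_equal_map_university_to_city_py := by
  intro name _
  unfold Spec_map_university_to_city_py map_university_to_city_py map_university_to_city_py_alt pvKeywordPriority pvCities
  cases h1 : PySem.Str.isIn "sapienza" (PySem.Str.lower name) <;>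
  cases h2 : PySem.Str.isIn "roma tre" (PySem.Str.lower name) <;>
  cases h3 : PySem.Str.isIn "tor vergata" (PySem.Str.lower name) <;>
  cases h4 : PySem.Str.isIn "luiss" (PySem.Str.lower name) <;>
  cases h5 : PySem.Str.isIn "cattolica" (PySem.Str.lower name) <;>
  cases h6 : PySem.Str.isIn "cassino" (PySem.Str.lower name) <;>
  cases h7 : PySem.Str.isIn "viterbo" (PySem.Str.lower name) <;>
  cases h8 : PySem.Str.isIn "tuscia" (PySem.Str.lower name) <;>
  cases h9 : PySem.Str.isIn "latina" (PySem.Str.lower name) <;>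
  cases h10 : PySem.Str.isIn "frosinone" (PySem.Str.lower name) <;>
  cases h11 : PySem.Str.isIn "rieti" (PySem.Str.lower name) <;>
  simp only [List.any_cons, List.any_nil, List.filter, List.map, h1, h2, h3, h4, h5, h6, h7, h8,
    h9, h10, h11, Bool.or_false, Bool.false_or, Bool.true_or, Bool.or_true, Bool.or_self,
    Bool.false_eq_true, if_true, if_false] <;>
  rfl
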